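-- pv_equiv track=rewrite | github.com/tikhonyaa/Irina_Tikhonenko_pish | homework/lab6/module.py | add_multi
-- ===== SOURCE A (Python) =====
-- def add_multi(num):
--     total_sum = 0
--     total_multi = 1
--     x = num
--     while x > 0:
--         digit = x % 10
--         total_sum += digit
--         total_multi *= digit
--         x //= 10
--     return total_sum == total_multi
-- ===== SOURCE B (Python) =====
-- def add_multi(num):
--     if num <= 0:
--         return False
--     s = str(num)
--     total = 0
--     prod = 1
--     for d in range(10):
--         c = s.count(str(d))
--         total += d * c
--         prod *= d ** c
--     return total == prod
-- ===== Notes on version B (the rewrite author's own statement) =====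
-- stated objective: alternative
-- what changed: B replaces A's single digit-peeling loop (modulo/floor-division with running sum and product accumulators) by a histogram over digit values: after a non-positive guard it counts, for each d in 0..9, the occurrences of d in str(num) and reduces sum = sum(d*c(d)) and product = prod(d**c(d)) via exponentiation.
import Mathlib
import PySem

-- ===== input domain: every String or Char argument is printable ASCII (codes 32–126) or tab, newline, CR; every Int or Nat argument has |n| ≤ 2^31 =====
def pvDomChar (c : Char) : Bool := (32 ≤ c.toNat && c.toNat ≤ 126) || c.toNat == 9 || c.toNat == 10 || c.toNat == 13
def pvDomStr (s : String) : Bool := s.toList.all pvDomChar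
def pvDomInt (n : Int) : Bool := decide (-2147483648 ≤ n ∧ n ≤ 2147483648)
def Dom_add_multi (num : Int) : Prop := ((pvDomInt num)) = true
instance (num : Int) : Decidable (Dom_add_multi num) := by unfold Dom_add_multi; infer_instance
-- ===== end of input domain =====

-- B replaces A's digit-peeling accumulator loop by a per-digit-value histogram: for each d in 0..9 it
-- counts d's occurrences in str(num) and reduces sum = Σ d·c(d) and product = Π d^c(d); return value only.


-- ===== PORT A =====
-- the 'while x > 0' loop: state (x, total_sum, total_multi)
def addMultiLoop (x total_sum total_multi : Int) : Bool :=
  if x > 0 then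
    let digit := PySem.Int.mod x 10
    addMultiLoop (PySem.Int.floordiv x 10) (total_sum + digit) (total_multi * digit)
  else
    total_sum == total_multi
termination_by x.toNat
decreasing_by
  rename_i h
  rw [PySem.Int.floordiv_eq_ediv_of_pos (by omega : (0:Int) < 10)]
  omega

def add_multi (num : Int) : Bool := addMultiLoop num 0 1

-- ===== PORT B =====
-- 'for d in range(10): c = s.count(str(d)); total += d*c; prod *= d**c' — state (total, prod);
-- str(d) for d in 0..9 is the single character str(num) can contain, s.count counts its occurrences.
def add_multi_alt (num : Int) : Bool :=
  if num ≤ 0 then false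
  else
    let s := PySem.Int.toChars num
    let r := (PySem.List.pyRange 0 10 1).foldl
      (fun (tp : Int × Int) (d : Int) =>
        let c : Nat := PySem.Chars.count s (PySem.Int.toChars d)
        (tp.1 + d * (c : Int), tp.2 * d ^ c)) ((0 : Int), (1 : Int))
    r.1 == r.2

-- ===== PRECONDITION & SPEC =====
def Spec_add_multi (num : Int) (out : Bool) : Prop := out = add_multi_alt num
instance (num : Int) (out : Bool) : Decidable (Spec_add_multi num out) := by unfold Spec_add_multi; infer_instance

-- ===== CLAIM (what is proved, stated in full; the proofs are below) =====
def Claim_equal_add_multi : Prop := ∀ (num : Int), Dom_add_multi num → Spec_add_multi num (add_multi num)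

-- ===== LEMMAS AND PROOFS =====

-- the Int digit values of m (least significant last), [] at 0
def digL (m : Nat) : List Int :=
  if m = 0 then [] else (Nat.toDigits 10 m).map (fun c => ((c.toNat : Int) - 48))

lemma toDigitsCore_acc (f : Nat) : ∀ (n : Nat) (acc : List Char),
    Nat.toDigitsCore 10 f n acc = Nat.toDigitsCore 10 f n [] ++ acc := by
  induction f with
  | zero => intro n acc; simp [Nat.toDigitsCore]
  | succ f ih =>
    intro n acc
    simp only [Nat.toDigitsCore]
    by_cases h : n / 10 = 0
    · simp [h]
    · simp only [h, if_false]
      rw [ih (n / 10) (Nat.digitChar (n % 10) :: acc), ih (n / 10) [Nat.digitChar (n % 10)]]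
      simp

lemma toDigitsCore_fuel (f : Nat) : ∀ (g n : Nat), n < f → n < g →
    Nat.toDigitsCore 10 f n [] = Nat.toDigitsCore 10 g n [] := by
  induction f with
  | zero => intro g n h; omega
  | succ f ih =>
    intro g n hf hg
    cases g with
    | zero => omega
    | succ g =>
      simp only [Nat.toDigitsCore]
      by_cases h : n / 10 = 0
      · simp [h]
      · simp only [h, if_false]
        rw [toDigitsCore_acc f, toDigitsCore_acc g, ih g (n / 10) (by omega) (by omega)]

lemma toDigits_step (m : Nat) (hm : 10 ≤ m) :
    Nat.toDigits 10 m = Nat.toDigits 10 (m / 10) ++ [Nat.digitChar (m % 10)] := by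
  show Nat.toDigitsCore 10 (m + 1) m [] = _
  have h10 : m / 10 ≠ 0 := by omega
  simp only [Nat.toDigitsCore, h10, if_false]
  rw [toDigitsCore_acc m, toDigitsCore_fuel m (m / 10 + 1) (m / 10) (by omega) (by omega)]
  rfl

lemma toDigits_small (m : Nat) (hm : m < 10) :
    Nat.toDigits 10 m = [Nat.digitChar m] := by
  show Nat.toDigitsCore 10 (m + 1) m [] = _
  simp [Nat.toDigitsCore, Nat.div_eq_of_lt hm, Nat.mod_eq_of_lt hm]

lemma digitChar_val (d : Nat) (hd : d < 10) :
    ((Nat.digitChar d).toNat : Int) - 48 = (d : Int) := by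
  interval_cases d <;> rfl

lemma digL_step (m : Nat) (hm : 0 < m) :
    digL m = digL (m / 10) ++ [((m % 10 : Nat) : Int)] := by
  by_cases h : m < 10
  · have h10 : m / 10 = 0 := Nat.div_eq_of_lt h
    have hmod : m % 10 = m := Nat.mod_eq_of_lt h
    rw [hmod]
    simp [digL, h10, toDigits_small m h, digitChar_val m h, hm.ne']
  · have : m / 10 ≠ 0 := by omega
    simp [digL, hm.ne', this, toDigits_step m (by omega),
      digitChar_val (m % 10) (Nat.mod_lt _ (by omega))]

lemma digL_mem (m : Nat) : ∀ x ∈ digL m, 0 ≤ x ∧ x < 10 := by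
  induction m using Nat.strong_induction_on with
  | _ m ih =>
    intro x hx
    by_cases hm : m = 0
    · subst hm; simp [digL] at hx
    · rw [digL_step m (Nat.pos_of_ne_zero hm)] at hx
      rcases List.mem_append.mp hx with h | h
      · exact ih (m / 10) (Nat.div_lt_self (Nat.pos_of_ne_zero hm) (by omega)) x h
      · simp at h
        subst h
        have := Nat.mod_lt m (show 0 < 10 by omega)
        omega

lemma addMultiLoop_eq (m : Nat) : ∀ (s p : Int),
    addMultiLoop (m : Int) s p = decide (s + (digL m).sum = p * (digL m).prod) := by
  induction m using Nat.strong_induction_on with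
  | _ m ih =>
    intro s p
    by_cases hm : m = 0
    · subst hm
      rw [addMultiLoop]
      simp [digL, Bool.beq_eq_decide_eq]
    · have hpos : (0 : Int) < (m : Int) := by exact_mod_cast Nat.pos_of_ne_zero hm
      have hmod : PySem.Int.mod (m : Int) 10 = ((m % 10 : Nat) : Int) := by
        exact_mod_cast PySem.Int.mod_natCast m 10
      have hdiv : PySem.Int.floordiv (m : Int) 10 = ((m / 10 : Nat) : Int) := by
        exact_mod_cast PySem.Int.floordiv_natCast m 10
      rw [addMultiLoop]
      simp only [hpos, if_pos, hmod, hdiv]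
      rw [ih (m / 10) (Nat.div_lt_self (Nat.pos_of_ne_zero hm) (by omega)),
        digL_step m (Nat.pos_of_ne_zero hm)]
      simp only [List.sum_append, List.prod_append, List.sum_cons, List.sum_nil,
        List.prod_cons, List.prod_nil]
      rw [decide_eq_decide]
      constructor <;> intro h <;> [linarith [h]; nlinarith [h]]

-- s.count(sub) for a single-character sub is plain character counting
lemma countgo_singleton (c : Char) : ∀ (s : List Char) (fuel acc : Nat), s.length ≤ fuel →
    PySem.Chars.count.go [c] fuel s acc = acc + s.count c := by
  intro s
  induction s with
  | nil => intro fuel acc _; cases fuel <;> simp [PySem.Chars.count.go]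
  | cons h t ih =>
    intro fuel acc hf
    cases fuel with
    | zero => simp at hf
    | succ fuel =>
      simp only [PySem.Chars.count.go]
      by_cases hc : c = h
      · subst hc
        simp only [List.isPrefixOf, Bool.and_true, beq_self_eq_true, if_pos]
        rw [show List.drop (List.length [c]) (c :: t) = t by simp]
        rw [ih fuel (acc + 1) (by simpa using hf)]
        simp
        omega
      · have : ([c].isPrefixOf (h :: t)) = false := by
          simp [List.isPrefixOf, hc]
        rw [this]
        simp only [Bool.false_eq_true, if_false]
        rw [ih fuel acc (by simpa using hf)]
        simp [Ne.symm hc]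

lemma count_singleton (s : List Char) (c : Char) :
    PySem.Chars.count s [c] = s.count c := by
  have : ([c] : List Char).isEmpty = false := rfl
  simp only [PySem.Chars.count, this, Bool.false_eq_true, if_false]
  simpa using countgo_singleton c s s.length 0 (le_refl _)

-- the characters str(m) counts are the digit characters of digL m
lemma count_chars (m : Nat) (hm : 0 < m) : ∀ (d : Nat), d < 10 →
    (Nat.toDigits 10 m).count (Nat.digitChar d) = (digL m).count ((d : Nat) : Int) := by
  induction m using Nat.strong_induction_on with
  | _ m ih =>
    intro d hd
    have hinj : ∀ a, a < 10 → ∀ b, b < 10 → ((Nat.digitChar a = Nat.digitChar b) ↔ a = b) := by decide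
    by_cases h : m < 10
    · rw [toDigits_small m h, digL_step m hm, Nat.div_eq_of_lt h, Nat.mod_eq_of_lt h]
      have hz : digL 0 = [] := by simp [digL]
      rw [hz, List.nil_append, List.count_singleton, List.count_singleton]
      by_cases he : d = m
      · subst he; simp
      · have h1 : (Nat.digitChar m == Nat.digitChar d) = false := by
          simp only [beq_eq_false_iff_ne, ne_eq, hinj m h d hd]; omega
        have h2 : (((m : Nat) : Int) == ((d : Nat) : Int)) = false := by
          simp only [beq_eq_false_iff_ne, ne_eq]; omega
        rw [h1, h2]
    · rw [toDigits_step m (by omega), digL_step m hm,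
        List.count_append, List.count_append]
      have hdivpos : 0 < m / 10 := Nat.div_pos (by omega) (by omega)
      rw [ih (m / 10) (Nat.div_lt_self hm (by omega)) hdivpos d hd]
      congr 1
      rw [List.count_singleton, List.count_singleton]
      have hmlt : m % 10 < 10 := Nat.mod_lt m (by omega)
      by_cases he : d = m % 10
      · subst he; simp
      · have h1 : (Nat.digitChar (m % 10) == Nat.digitChar d) = false := by
          simp only [beq_eq_false_iff_ne, ne_eq, hinj (m % 10) hmlt d hd]; omega
        have h2 : (((m % 10 : Nat) : Int) == ((d : Nat) : Int)) = false := by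
          simp only [beq_eq_false_iff_ne, ne_eq]; omega
        rw [h1, h2]

-- histogram reductions: B's Σ d·count and Π d^count over d = 0..9 recover sum and product
lemma hist_sum (l : List Int) (h : ∀ x ∈ l, 0 ≤ x ∧ x < 10) :
    (0 : Int) + 0 * (l.count 0 : Int) + 1 * (l.count 1 : Int) + 2 * (l.count 2 : Int)
      + 3 * (l.count 3 : Int) + 4 * (l.count 4 : Int) + 5 * (l.count 5 : Int)
      + 6 * (l.count 6 : Int) + 7 * (l.count 7 : Int) + 8 * (l.count 8 : Int)
      + 9 * (l.count 9 : Int) = l.sum := by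
  induction l with
  | nil => simp
  | cons a t ih =>
    have ha := h a (List.mem_cons_self)
    have iht := ih (fun x hx => h x (List.mem_cons_of_mem a hx))
    have hb : 0 ≤ a ∧ a < 10 := ha
    simp only [List.count_cons, List.sum_cons]
    obtain ⟨h0, h1⟩ := hb
    interval_cases a <;> norm_num <;> linarith [iht]

lemma hist_prod (l : List Int) (h : ∀ x ∈ l, 0 ≤ x ∧ x < 10) :
    (1 : Int) * 0 ^ (l.count 0) * 1 ^ (l.count 1) * 2 ^ (l.count 2)
      * 3 ^ (l.count 3) * 4 ^ (l.count 4) * 5 ^ (l.count 5)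
      * 6 ^ (l.count 6) * 7 ^ (l.count 7) * 8 ^ (l.count 8)
      * 9 ^ (l.count 9) = l.prod := by
  induction l with
  | nil => simp
  | cons a t ih =>
    have ha := h a (List.mem_cons_self)
    have iht := ih (fun x hx => h x (List.mem_cons_of_mem a hx))
    simp only [List.count_cons, List.prod_cons]
    obtain ⟨h0, h1⟩ := ha
    interval_cases a <;> norm_num [pow_succ] <;>
      first
        | linear_combination (0:Int) * iht
        | linear_combination iht
        | linear_combination (2:Int) * iht
        | linear_combination (3:Int) * iht
        | linear_combination (4:Int) * iht
        | linear_combination (5:Int) * iht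
        | linear_combination (6:Int) * iht
        | linear_combination (7:Int) * iht
        | linear_combination (8:Int) * iht
        | linear_combination (9:Int) * iht

-- ===== VERDICT (by name: the statement is the Claim_ definition above) =====
theorem add_multi_spec : Claim_equal_add_multi := by
  intro num _
  unfold Spec_add_multi add_multi add_multi_alt
  by_cases h : num ≤ 0
  · rw [addMultiLoop]
    simp [h, not_lt.mpr h]
  · have hpos : 0 < num := by omega
    have hcast : num = (num.toNat : Int) := by omega
    have hne : num.toNat ≠ 0 := by omega
    have hmpos : 0 < num.toNat := by omega
    conv_lhs => rw [hcast]
    rw [addMultiLoop_eq num.toNat 0 1, if_neg h]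
    have hchars : PySem.Int.toChars num = Nat.toDigits 10 num.toNat := by
      simp [PySem.Int.toChars, not_lt.mpr hpos.le]
    have hrange : PySem.List.pyRange 0 10 1 = ([0,1,2,3,4,5,6,7,8,9] : List Int) := by decide
    simp only [hchars, hrange, List.foldl]
    have hc : ∀ d : Nat, d < 10 →
        PySem.Chars.count (Nat.toDigits 10 num.toNat) [Nat.digitChar d]
          = (digL num.toNat).count ((d : Nat) : Int) := by
      intro d hd
      rw [count_singleton, count_chars num.toNat hmpos d hd]
    have h0 := hc 0 (by omega); have h1 := hc 1 (by omega); have h2 := hc 2 (by omega)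
    have h3 := hc 3 (by omega); have h4 := hc 4 (by omega); have h5 := hc 5 (by omega)
    have h6 := hc 6 (by omega); have h7 := hc 7 (by omega); have h8 := hc 8 (by omega)
    have h9 := hc 9 (by omega)
    simp only [show PySem.Int.toChars 0 = [Nat.digitChar 0] from rfl,
      show PySem.Int.toChars 1 = [Nat.digitChar 1] from rfl,
      show PySem.Int.toChars 2 = [Nat.digitChar 2] from rfl,
      show PySem.Int.toChars 3 = [Nat.digitChar 3] from rfl,
      show PySem.Int.toChars 4 = [Nat.digitChar 4] from rfl,
      show PySem.Int.toChars 5 = [Nat.digitChar 5] from rfl,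
      show PySem.Int.toChars 6 = [Nat.digitChar 6] from rfl,
      show PySem.Int.toChars 7 = [Nat.digitChar 7] from rfl,
      show PySem.Int.toChars 8 = [Nat.digitChar 8] from rfl,
      show PySem.Int.toChars 9 = [Nat.digitChar 9] from rfl,
      h0, h1, h2, h3, h4, h5, h6, h7, h8, h9]
    have hs := hist_sum (digL num.toNat) (digL_mem num.toNat)
    have hp := hist_prod (digL num.toNat) (digL_mem num.toNat)
    simp only [Bool.beq_eq_decide_eq, decide_eq_decide]
    push_cast at hs ⊢
    constructor <;> intro hh
    · rw [← hs, ← hp] at hh; linarith [hh]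
    · rw [← hs, ← hp]; linarith [hh]
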